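-- pv_equiv track=rewrite | github.com/piotrhelm/NESTFUL | data_v2/executable_functions/py_code_file_1521.py | group_by_digit_frequency
-- ===== SOURCE A (Python) =====
-- from collections import defaultdict
-- from typing import Dict, List
--
-- def group_by_digit_frequency(numbers: List[int]) -> Dict[int, List[int]]:
--
--     """Groups the elements of a list of numbers by their digit frequency.
--
--
--
--     Args:
--
--         numbers: A list of numbers.
--
--
--
--     Returns:
--
--         A dictionary where each key is the digit frequency and each value is the list of numbers with the given frequency.
--
--
--
--     Raises:
--
--         ValueError: If the provided list is empty.
--
--     """
--
--     if len(numbers) == 0: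
--
--         raise ValueError('The provided list is empty')
--
--     frequencies = defaultdict(list)
--
--     for number in numbers:
--
--         digit_count = len(str(number))
--
--         frequencies[digit_count].append(number)
--
--     return frequencies
-- ===== SOURCE B (Python) =====
-- def group_by_digit_frequency(numbers):
--     if len(numbers) == 0:
--         raise ValueError('The provided list is empty')
--     keys = []
--     for number in numbers:
--         k = len(str(number))
--         if k not in keys:
--             keys.append(k)
--     return {k: [n for n in numbers if len(str(n)) == k] for k in keys}
-- ===== Notes on version B (the rewrite author's own statement) =====
-- stated objective: alternative
-- what changed: Instead of one pass appending into a defaultdict, B first collects the distinct digit-count keys in first-occurrence order and then builds each group by filtering the whole input list per key.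
import Mathlib
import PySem

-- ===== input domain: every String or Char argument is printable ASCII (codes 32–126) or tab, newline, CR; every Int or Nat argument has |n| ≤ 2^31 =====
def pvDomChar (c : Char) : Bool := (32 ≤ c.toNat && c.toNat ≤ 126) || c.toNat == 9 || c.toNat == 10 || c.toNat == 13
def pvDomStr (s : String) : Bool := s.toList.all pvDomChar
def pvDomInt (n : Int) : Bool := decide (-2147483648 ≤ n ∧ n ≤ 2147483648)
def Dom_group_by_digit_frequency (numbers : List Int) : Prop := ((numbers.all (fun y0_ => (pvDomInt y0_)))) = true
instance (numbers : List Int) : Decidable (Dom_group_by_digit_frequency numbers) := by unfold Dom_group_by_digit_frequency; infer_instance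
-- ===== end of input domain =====

-- B replaces A's single-pass defaultdict accumulation by a dedup-the-keys pass followed by one filter pass per key (alternative decomposition, not faster).


-- digit_count = len(str(number)), shared subexpression of both Pythons
def pvKey (n : Int) : Int := PySem.Str.len (PySem.Int.toStr n)

-- ===== PORT A =====
def group_by_digit_frequency (numbers : List Int) : List (Int × List Int) :=
  -- frequencies = defaultdict(list); for number in numbers: frequencies[len(str(number))].append(number)
  (numbers.foldl (fun d number => d.modify (pvKey number) [] (fun l => l ++ [number]))
    PySem.Dict.empty).items

-- ===== PORT B =====
def group_by_digit_frequency_alt (numbers : List Int) : List (Int × List Int) :=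
  -- keys = []; for number in numbers: if k not in keys: keys.append(k)
  let keys := numbers.foldl (fun ks number =>
    if pvKey number ∈ ks then ks else ks ++ [pvKey number]) ([] : List Int)
  -- {k: [n for n in numbers if len(str(n)) == k] for k in keys}
  keys.map (fun k => (k, numbers.filter (fun n => pvKey n == k)))

-- ===== PRECONDITION & SPEC =====
-- Python A raises ValueError on the empty list (and B keeps that guard); Pre_ excludes exactly that input.
def Pre_group_by_digit_frequency (numbers : List Int) : Prop := numbers ≠ []
instance (numbers : List Int) : Decidable (Pre_group_by_digit_frequency numbers) := by unfold Pre_group_by_digit_frequency; infer_instance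
def pvWitness_group_by_digit_frequency : List Int := [5, -42, 100, 7]

def Spec_group_by_digit_frequency (numbers : List Int) (out : List (Int × List Int)) : Prop := out = group_by_digit_frequency_alt numbers
instance (numbers : List Int) (out : List (Int × List Int)) : Decidable (Spec_group_by_digit_frequency numbers out) := by unfold Spec_group_by_digit_frequency; infer_instance

-- ===== CLAIM (what is proved, stated in full; the proofs are below) =====
def Claim_equal_group_by_digit_frequency : Prop := ∀ (numbers : List Int), Dom_group_by_digit_frequency numbers → Pre_group_by_digit_frequency numbers → Spec_group_by_digit_frequency numbers (group_by_digit_frequency numbers)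

-- ===== LEMMAS AND PROOFS =====

-- PySem.Dict.modify is definitionally insert of the modified value
theorem pv_modify_eq_insert (d : PySem.Dict Int (List Int)) (k : Int) (f : List Int → List Int) :
    d.modify k [] f = d.insert k (f (d.getD k [])) := rfl

-- the running group of key k' is the filter of the processed prefix
theorem pv_getD_fold (xs : List Int) (d : PySem.Dict Int (List Int)) (k' : Int) :
    ((xs.foldl (fun d number => d.modify (pvKey number) [] (fun l => l ++ [number])) d).getD k' []) =
      d.getD k' [] ++ xs.filter (fun n => pvKey n == k') := by
  induction xs generalizing d with
  | nil => simp
  | cons x xs ih =>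
    simp only [List.foldl_cons, ih, PySem.Dict.getD_modify, List.filter_cons]
    by_cases h : k' = pvKey x
    · simp [h, List.append_assoc]
    · have : (pvKey x == k') = false := by simp [Ne.symm h]
      simp [h, this]

-- keys and items of A's fold, simultaneously, by reverse induction
theorem pv_fold_spec (xs : List Int) :
    ((xs.foldl (fun d number => d.modify (pvKey number) [] (fun l => l ++ [number]))
        PySem.Dict.empty).keys =
      xs.foldl (fun ks number => if pvKey number ∈ ks then ks else ks ++ [pvKey number]) []) ∧
    ((xs.foldl (fun d number => d.modify (pvKey number) [] (fun l => l ++ [number]))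
        PySem.Dict.empty).items =
      (xs.foldl (fun ks number => if pvKey number ∈ ks then ks else ks ++ [pvKey number]) []).map
        (fun k => (k, xs.filter (fun n => pvKey n == k)))) := by
  induction xs using List.reverseRecOn with
  | nil => exact ⟨rfl, rfl⟩
  | append_singleton xs n ih =>
    obtain ⟨hk, hi⟩ := ih
    set step := fun (d : PySem.Dict Int (List Int)) (number : Int) =>
      d.modify (pvKey number) [] (fun l => l ++ [number]) with hstep
    set kstep := fun (ks : List Int) (number : Int) =>
      if pvKey number ∈ ks then ks else ks ++ [pvKey number] with hkstep
    set D := xs.foldl step PySem.Dict.empty with hD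
    set K := xs.foldl kstep [] with hK
    have hfold : (xs ++ [n]).foldl step PySem.Dict.empty =
        D.insert (pvKey n) (D.getD (pvKey n) [] ++ [n]) := by
      rw [List.foldl_append]
      simp only [List.foldl_cons, List.foldl_nil, hstep]
      exact pv_modify_eq_insert D (pvKey n) _
    have hkfold : (xs ++ [n]).foldl kstep [] =
        if pvKey n ∈ K then K else K ++ [pvKey n] := by
      rw [List.foldl_append]; rfl
    have hcontains : D.contains (pvKey n) = true ↔ pvKey n ∈ K := by
      rw [PySem.Dict.contains_iff_mem_keys, hk]
    have hval : D.getD (pvKey n) [] ++ [n] = (xs ++ [n]).filter (fun m => pvKey m == pvKey n) := by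
      have := pv_getD_fold xs PySem.Dict.empty (pvKey n)
      simp only [PySem.Dict.getD_empty, List.nil_append] at this
      rw [← hD] at this
      simp [this, List.filter_append]
    -- filters over xs are unchanged by appending n, for keys other than pvKey n
    have hfilter : ∀ k : Int, k ≠ pvKey n →
        (xs ++ [n]).filter (fun m => pvKey m == k) = xs.filter (fun m => pvKey m == k) := by
      intro k hne
      simp [List.filter_append, Ne.symm hne]
    by_cases hmem : pvKey n ∈ K
    · have hc : D.contains (pvKey n) = true := hcontains.2 hmem
      have hkeys := PySem.Dict.keys_insert_of_contains D (D.getD (pvKey n) [] ++ [n]) hc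
      constructor
      · rw [hfold, hkfold, hkeys, hk, if_pos hmem]
      · rw [hfold, hkfold, PySem.Dict.items_insert, if_pos hc, if_pos hmem, hi, List.map_map]
        apply List.map_congr_left
        intro k _
        simp only [Function.comp_apply]
        by_cases hkn : k = pvKey n
        · rw [hkn, if_pos (by simp), hval]
        · rw [if_neg (by simp [hkn]), hfilter k hkn]
    · have hc : D.contains (pvKey n) = false := by
        by_contra h
        exact hmem (hcontains.1 (by simpa using h))
      have hkeys := PySem.Dict.keys_insert_of_not_contains D (D.getD (pvKey n) [] ++ [n]) hc
      constructor
      · rw [hfold, hkfold, hkeys, hk, if_neg hmem]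
      · rw [hfold, hkfold, PySem.Dict.items_insert, hc, if_neg hmem, hi]
        simp only [Bool.false_eq_true, if_false, List.map_append, List.map_cons, List.map_nil]
        congr 1
        · apply List.map_congr_left
          intro k hkK
          have hkn : k ≠ pvKey n := fun h => hmem (h ▸ hkK)
          rw [hfilter k hkn]
        · rw [hval]

-- ===== VERDICT (by name: the statement is the Claim_ definition above) =====
theorem group_by_digit_frequency_spec : Claim_equal_group_by_digit_frequency := by
  intro numbers _ _
  show group_by_digit_frequency numbers = group_by_digit_frequency_alt numbers
  unfold group_by_digit_frequency group_by_digit_frequency_alt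
  exact (pv_fold_spec numbers).2
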